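-- pv_equiv track=rewrite | github.com/vjsingh1984/victor | victor/ui/slash/commands/codebase.py | merge_init_content
-- ===== SOURCE A (Python) =====
-- def merge_init_content(existing: str, new: str) -> str:
--     """Merge new analysis with existing content, preserving user sections.
--
--     This is a public method for use by CLI commands that also need merging
--     functionality.
--     """
--     # Simple merge: keep user-added sections, update auto-generated ones
--     # Look for markers like "<!-- AUTO-GENERATED -->" or "## Project Overview"
--
--     # For now, a simple strategy: append new sections that don't exist
--     existing_sections = set()
--     for line in existing.split("\n"):
--         if line.startswith("## "):
--             existing_sections.add(line.strip())
--
--     new_lines = []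
--     current_section = None
--     skip_section = False
--
--     for line in new.split("\n"):
--         if line.startswith("## "):
--             current_section = line.strip()
--             skip_section = current_section in existing_sections
--             if skip_section:
--                 continue
--
--         if not skip_section:
--             new_lines.append(line)
--
--     if new_lines:
--         return existing + "\n\n" + "\n".join(new_lines)
--     return existing
-- ===== SOURCE B (Python) =====
-- def merge_init_content(existing: str, new: str) -> str:
--     existing_sections = {line.strip() for line in existing.split("\n")
--                          if line.startswith("## ")}
--     # Partition new into blocks: a preamble plus one block per '## ' header line.
--     blocks = [[]]
--     for line in new.split("\n"):
--         if line.startswith("## "):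
--             blocks.append([line])
--         else:
--             blocks[-1].append(line)
--     kept = [b for b in blocks
--             if not (b and b[0].startswith("## ")
--                     and b[0].strip() in existing_sections)]
--     merged = [line for block in kept for line in block]
--     if merged:
--         return existing + "\n\n" + "\n".join(merged)
--     return existing
-- ===== Notes on version B (the rewrite author's own statement) =====
-- stated objective: alternative
-- what changed: Replaces A's stateful line loop (current_section/skip_section flags) by a block decomposition: partition new into a preamble plus one block per '## ' header, filter out blocks whose header (stripped) is already a section of existing, and flatten the survivors.
import Mathlib
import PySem

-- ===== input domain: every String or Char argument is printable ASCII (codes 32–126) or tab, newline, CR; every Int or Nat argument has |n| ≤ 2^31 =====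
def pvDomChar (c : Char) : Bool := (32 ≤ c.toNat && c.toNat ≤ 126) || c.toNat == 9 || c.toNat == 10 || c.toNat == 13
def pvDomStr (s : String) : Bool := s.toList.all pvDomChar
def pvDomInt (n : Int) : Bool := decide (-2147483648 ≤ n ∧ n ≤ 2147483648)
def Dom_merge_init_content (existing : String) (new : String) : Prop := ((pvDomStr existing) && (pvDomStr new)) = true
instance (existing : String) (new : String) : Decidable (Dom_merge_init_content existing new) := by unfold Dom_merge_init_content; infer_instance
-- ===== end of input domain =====

-- B replaces A's stateful skip-flag line loop by a partition of `new` into header blocks,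
-- a filter on the block headers, and a flatten (same cost; objective: alternative decomposition).

-- s.split("\n") — sep is the non-empty literal "\n", so Python's split never raises (split? = none only for sep = "")
def pvSplitNL (s : String) : List String := (PySem.Str.split? s "\n").getD []

-- ===== PORT A =====
def merge_init_content (existing : String) (new : String) : String :=
  let existing_sections : PySem.Set String :=
    (pvSplitNL existing).foldl
      (fun s line =>
        if PySem.Str.startswith line "## " then PySem.Set.add s (PySem.Str.strip line) else s)
      PySem.Set.empty
  let st :=
    (pvSplitNL new).foldl
      (fun (st : List String × Bool) line =>
        if PySem.Str.startswith line "## " then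
          if PySem.Set.contains existing_sections (PySem.Str.strip line) then (st.1, true)
          else (st.1 ++ [line], false)
        else if st.2 then st else (st.1 ++ [line], st.2))
      ([], false)
  if st.1.isEmpty then existing else existing ++ "\n\n" ++ PySem.Str.join "\n" st.1

-- ===== PORT B =====
-- blocks[-1].append(line)
def pvAddToLast : List (List String) → String → List (List String)
  | [], l => [[l]]
  | [b], l => [b ++ [l]]
  | b :: bs, l => b :: pvAddToLast bs l

-- not (b and b[0].startswith("## ") and b[0].strip() in existing_sections)
def pvKeep (S : PySem.Set String) : List String → Bool
  | [] => true
  | h :: _ => !(PySem.Str.startswith h "## " && PySem.Set.contains S (PySem.Str.strip h))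

def merge_init_content_alt (existing : String) (new : String) : String :=
  let existing_sections : PySem.Set String :=
    PySem.Set.ofList
      (((pvSplitNL existing).filter
          (fun l => PySem.Str.startswith l "## ")).map PySem.Str.strip)
  let blocks :=
    (pvSplitNL new).foldl
      (fun bs line =>
        if PySem.Str.startswith line "## " then bs ++ [[line]] else pvAddToLast bs line)
      [[]]
  let merged := (blocks.filter (pvKeep existing_sections)).flatMap id
  if merged.isEmpty then existing else existing ++ "\n\n" ++ PySem.Str.join "\n" merged

-- ===== PRECONDITION & SPEC =====
def Spec_merge_init_content (existing : String) (new : String) (out : String) : Prop := out = merge_init_content_alt existing new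
instance (existing : String) (new : String) (out : String) : Decidable (Spec_merge_init_content existing new out) := by unfold Spec_merge_init_content; infer_instance

-- ===== CLAIM (what is proved, stated in full; the proofs are below) =====
def Claim_equal_merge_init_content : Prop := ∀ (existing : String) (new : String), Dom_merge_init_content existing new → Spec_merge_init_content existing new (merge_init_content existing new)

-- ===== LEMMAS AND PROOFS =====

-- the common "kept lines" function both loops compute
def pvK (S : PySem.Set String) : Bool → List String → List String
  | _, [] => []
  | skip, l :: rest =>
    if PySem.Str.startswith l "## " then
      if PySem.Set.contains S (PySem.Str.strip l) then pvK S true rest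
      else l :: pvK S false rest
    else if skip then pvK S skip rest else l :: pvK S skip rest

theorem pv_sections_eq (lines : List String) (s : PySem.Set String) :
    lines.foldl
      (fun s line =>
        if PySem.Str.startswith line "## " then PySem.Set.add s (PySem.Str.strip line) else s) s
    = ((lines.filter (fun l => PySem.Str.startswith l "## ")).map PySem.Str.strip).foldl
        PySem.Set.add s := by
  induction lines generalizing s with
  | nil => rfl
  | cons l rest ih =>
    simp at ih
    by_cases h : PySem.Str.startswith l "## " = true <;> simp at h <;>
      simp [List.foldl, List.filter, h, ih]

theorem pv_A_loop (S : PySem.Set String) (lines : List String)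
    (acc : List String) (skip : Bool) :
    (lines.foldl
      (fun (st : List String × Bool) line =>
        if PySem.Str.startswith line "## " then
          if PySem.Set.contains S (PySem.Str.strip line) then (st.1, true)
          else (st.1 ++ [line], false)
        else if st.2 then st else (st.1 ++ [line], st.2))
      (acc, skip)).1 = acc ++ pvK S skip lines := by
  induction lines generalizing acc skip with
  | nil => simp [pvK]
  | cons l rest ih =>
    simp at ih
    by_cases h : PySem.Str.startswith l "## " = true <;> simp at h
    · by_cases hc : PySem.Str.strip l ∈ S <;>
        simp [List.foldl, h, hc, ih, pvK]
    · cases skip <;> simp [List.foldl, h, ih, pvK]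

theorem pv_addToLast_cons (b : List String) (bs : List (List String)) (l : String)
    (h : bs ≠ []) : pvAddToLast (b :: bs) l = b :: pvAddToLast bs l := by
  cases bs with
  | nil => exact absurd rfl h
  | cons c cs => rfl

def pvStepB (bs : List (List String)) (line : String) : List (List String) :=
  if PySem.Str.startswith line "## " then bs ++ [[line]] else pvAddToLast bs line

theorem pv_stepB_ne_nil (bs : List (List String)) (l : String) (h : bs ≠ []) :
    pvStepB bs l ≠ [] := by
  unfold pvStepB
  split
  · simp
  · cases bs with
    | nil => exact absurd rfl h
    | cons c cs => cases cs <;> simp [pvAddToLast]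

theorem pv_F_cons (lines : List String) (b : List String) (bs : List (List String))
    (h : bs ≠ []) :
    lines.foldl pvStepB (b :: bs) = b :: lines.foldl pvStepB bs := by
  induction lines generalizing bs with
  | nil => rfl
  | cons l rest ih =>
    have hstep : pvStepB (b :: bs) l = b :: pvStepB bs l := by
      unfold pvStepB
      split
      · simp
      · exact pv_addToLast_cons b bs l h
    simp only [List.foldl, hstep]
    exact ih (pvStepB bs l) (pv_stepB_ne_nil bs l h)

theorem pv_keep_append (S : PySem.Set String) (cur : List String) (l : String)
    (h : PySem.Chars.startswith l.toList ['#', '#', ' '] = false) :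
    pvKeep S (cur ++ [l]) = pvKeep S cur := by
  cases cur with
  | nil => simp [pvKeep, h]
  | cons c cs => rfl

theorem pv_B_loop (S : PySem.Set String) (lines : List String) (cur : List String) :
    ((lines.foldl pvStepB [cur]).filter (pvKeep S)).flatMap id
    = (if pvKeep S cur then cur else []) ++ pvK S (!pvKeep S cur) lines := by
  induction lines generalizing cur with
  | nil =>
    by_cases h : pvKeep S cur = true <;> simp [List.filter, h, pvK]
  | cons l rest ih =>
    by_cases h : PySem.Str.startswith l "## " = true <;> simp at h
    · have hs : pvStepB [cur] l = [cur, [l]] := by simp [pvStepB, h]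
      have hd : rest.foldl pvStepB [cur, [l]] = cur :: rest.foldl pvStepB [[l]] :=
        pv_F_cons rest cur [[l]] (by simp)
      by_cases hc : PySem.Str.strip l ∈ S
      · have hkl : pvKeep S [l] = false := by simp [pvKeep, h, hc]
        by_cases hk : pvKeep S cur = true <;>
          simp [List.foldl, hs, hd, hk, ih, hkl, pvK, h, hc]
      · have hkl : pvKeep S [l] = true := by simp [pvKeep, h, hc]
        by_cases hk : pvKeep S cur = true <;>
          simp [List.foldl, hs, hd, hk, ih, hkl, pvK, h, hc]
    · have hs : pvStepB [cur] l = [cur ++ [l]] := by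
        cases cur <;> simp [pvStepB, pvAddToLast, h]
      have hkeq : pvKeep S (cur ++ [l]) = pvKeep S cur := pv_keep_append S cur l h
      by_cases hkc : pvKeep S cur = true <;>
        simp [List.foldl, hs, ih, hkeq, hkc, pvK, h]

-- ===== VERDICT (by name: the statement is the Claim_ definition above) =====
theorem merge_init_content_spec : Claim_equal_merge_init_content := by
  intro existing new _
  unfold Spec_merge_init_content
  show merge_init_content existing new = merge_init_content_alt existing new
  simp only [merge_init_content, merge_init_content_alt]
  have hof : PySem.Set.ofList
      (((pvSplitNL existing).filter
          (fun l => PySem.Str.startswith l "## ")).map PySem.Str.strip)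
    = (pvSplitNL existing).foldl
        (fun s line =>
          if PySem.Str.startswith line "## " then PySem.Set.add s (PySem.Str.strip line) else s)
        PySem.Set.empty := by
    rw [pv_sections_eq, PySem.Set.ofList_eq_foldl]; rfl
  rw [hof]
  set S := (pvSplitNL existing).foldl
      (fun s line =>
        if PySem.Str.startswith line "## " then PySem.Set.add s (PySem.Str.strip line) else s)
      PySem.Set.empty with hS
  have hBstep : (fun (bs : List (List String)) line =>
      if PySem.Str.startswith line "## " then bs ++ [[line]] else pvAddToLast bs line)
      = pvStepB := rfl
  rw [hBstep, pv_A_loop S (pvSplitNL new) [] false, pv_B_loop S (pvSplitNL new) []]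
  simp [pvKeep]
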